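-- pv_equiv track=rewrite | github.com/EmilianoGrimaldi/Stark-Desafio-03 | stark_03.py | generar_codigo_heroe
-- ===== SOURCE A (Python) =====
-- def generar_codigo_heroe(id_heroe:int, genero_heroe:str) -> str:
--     """Genera un codigo de 10 digitos del heroe
--
--     Args:
--         id_heroe (int): El entero que representara el codigo del heroe
--         genero_heroe (str): El genero del heroe (M - F - NB)
--
--     Returns:
--         str: El codigo del heroe en caso finalizar correctamente. En caso contrario "N/A"
--     """
--
--     if type(id_heroe) == int and (genero_heroe == "M" or genero_heroe == "F" or genero_heroe == "NB") and len(genero_heroe.strip()) > 0: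
--         codigo_heroe = f"{genero_heroe}-{id_heroe}"
--         ceros = ""
--
--         while len(codigo_heroe) < 10:
--             ceros += "0"
--             codigo_heroe = f"{genero_heroe}-{ceros}{id_heroe}"
--             if len(codigo_heroe) == 10:
--                 break
--
--         return codigo_heroe
--     else:
--         return "N/A"
-- ===== SOURCE B (Python) =====
-- def generar_codigo_heroe(id_heroe: int, genero_heroe: str) -> str:
--     """Genera el codigo de 10 caracteres del heroe, o "N/A" si los datos no son validos."""
--     if type(id_heroe) == int and genero_heroe in ("M", "F", "NB"):
--         prefix = f"{genero_heroe}-"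
--         body = str(id_heroe)
--         zeros = max(0, 10 - len(prefix) - len(body))
--         return prefix + "0" * zeros + body
--     return "N/A"
-- ===== Notes on version B (the rewrite author's own statement) =====
-- stated objective: simpler
-- what changed: Replaces A's rebuild-the-whole-string-per-zero while loop with a closed-form count of zeros (max(0, 10 - len(prefix) - len(body))) and a single concatenation.
import Mathlib
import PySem

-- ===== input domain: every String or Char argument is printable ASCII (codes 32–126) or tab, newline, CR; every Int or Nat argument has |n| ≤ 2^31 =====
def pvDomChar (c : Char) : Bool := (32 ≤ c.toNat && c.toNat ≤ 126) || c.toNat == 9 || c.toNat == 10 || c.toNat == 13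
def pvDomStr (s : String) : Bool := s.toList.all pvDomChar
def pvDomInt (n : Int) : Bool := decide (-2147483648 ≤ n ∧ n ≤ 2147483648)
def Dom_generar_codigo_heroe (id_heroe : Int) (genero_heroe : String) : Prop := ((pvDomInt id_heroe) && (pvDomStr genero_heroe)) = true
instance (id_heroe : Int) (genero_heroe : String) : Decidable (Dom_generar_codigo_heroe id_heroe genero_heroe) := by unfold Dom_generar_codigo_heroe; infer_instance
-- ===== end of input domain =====

-- B replaces A's rebuild-and-grow padding loop with a closed-form zero count; objective: simpler.


-- ===== PORT A =====
-- A's while loop; the fuel argument only makes it total (each iteration grows the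
-- string by one char, so starting from length ≥ 3 at most 7 iterations run)
def pvALoop (fuel : Nat) (genero body ceros codigo : String) : String :=
  match fuel with
  | 0 => codigo
  | fuel' + 1 =>
    if PySem.Str.len codigo < 10 then
      let ceros' := ceros ++ "0"
      let codigo' := genero ++ "-" ++ ceros' ++ body
      if PySem.Str.len codigo' = 10 then codigo'
      else pvALoop fuel' genero body ceros' codigo'
    else codigo

def generar_codigo_heroe (id_heroe : Int) (genero_heroe : String) : String :=
  -- type(id_heroe) == int is always true under the Int type convention
  if (genero_heroe == "M" || genero_heroe == "F" || genero_heroe == "NB")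
      && decide (0 < PySem.Str.len (PySem.Str.strip genero_heroe)) then
    pvALoop 11 genero_heroe (PySem.Int.toStr id_heroe) ""
      (genero_heroe ++ "-" ++ PySem.Int.toStr id_heroe)
  else "N/A"

-- ===== PORT B =====
def generar_codigo_heroe_alt (id_heroe : Int) (genero_heroe : String) : String :=
  if genero_heroe == "M" || genero_heroe == "F" || genero_heroe == "NB" then
    let pref := genero_heroe ++ "-"
    let body := PySem.Int.toStr id_heroe
    let zeros : Int := max 0 (10 - PySem.Str.len pref - PySem.Str.len body)
    pref ++ String.ofList (List.replicate zeros.toNat '0') ++ body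
  else "N/A"

-- ===== PRECONDITION & SPEC =====
def Spec_generar_codigo_heroe (id_heroe : Int) (genero_heroe : String) (out : String) : Prop := out = generar_codigo_heroe_alt id_heroe genero_heroe
instance (id_heroe : Int) (genero_heroe : String) (out : String) : Decidable (Spec_generar_codigo_heroe id_heroe genero_heroe out) := by unfold Spec_generar_codigo_heroe; infer_instance

-- ===== CLAIM (what is proved, stated in full; the proofs are below) =====
def Claim_equal_generar_codigo_heroe : Prop := ∀ (id_heroe : Int) (genero_heroe : String), Dom_generar_codigo_heroe id_heroe genero_heroe → Spec_generar_codigo_heroe id_heroe genero_heroe (generar_codigo_heroe id_heroe genero_heroe)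

-- ===== LEMMAS AND PROOFS =====

theorem pvALoop_spec (fuel : Nat) (g b : String) :
    ∀ (ceros codigo : String), codigo = g ++ "-" ++ ceros ++ b →
    10 - codigo.length ≤ fuel →
    pvALoop fuel g b ceros codigo
      = g ++ "-" ++ ceros ++ String.ofList (List.replicate (10 - codigo.length) '0') ++ b := by
  induction fuel with
  | zero =>
    intro ceros codigo hc hf
    have h0 : 10 - codigo.length = 0 := Nat.le_zero.mp hf
    rw [h0, hc]
    simp [pvALoop]
  | succ n ih =>
    intro ceros codigo hc hf
    by_cases hlt : codigo.length < 10
    · have hlenI : PySem.Str.len codigo < 10 := by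
        simp only [PySem.Str.len_eq]
        have : codigo.toList.length < 10 := by simpa using hlt
        exact_mod_cast this
      have hdash : ("-" : String).length = 1 := by decide
      have hzch : ("0" : String).length = 1 := by decide
      have hlennew : (g ++ "-" ++ (ceros ++ "0") ++ b).length = codigo.length + 1 := by
        simp [hc, hdash, hzch]
        omega
      by_cases h10 : (g ++ "-" ++ (ceros ++ "0") ++ b).length = 10
      · have h10I : PySem.Str.len (g ++ "-" ++ (ceros ++ "0") ++ b) = 10 := by
          rw [PySem.Str.len_eq, show (g ++ "-" ++ (ceros ++ "0") ++ b).toList.length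
            = (g ++ "-" ++ (ceros ++ "0") ++ b).length from by simp [hdash, hzch]; omega]
          exact_mod_cast h10
        have hk : 10 - codigo.length = 1 := by omega
        simp only [pvALoop, if_pos hlenI, if_pos h10I, hk]
        apply String.toList_inj.mp
        simp
      · have h10I : ¬ PySem.Str.len (g ++ "-" ++ (ceros ++ "0") ++ b) = 10 := by
          rw [PySem.Str.len_eq, show (g ++ "-" ++ (ceros ++ "0") ++ b).toList.length
            = (g ++ "-" ++ (ceros ++ "0") ++ b).length from by simp [hdash, hzch]; omega]
          exact_mod_cast h10
        have hrec := ih (ceros ++ "0") (g ++ "-" ++ (ceros ++ "0") ++ b) rfl (by omega)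
        simp only [pvALoop, if_pos hlenI, if_neg h10I, hrec, hlennew]
        have hk : 10 - codigo.length = (10 - (codigo.length + 1)) + 1 := by omega
        rw [hk]
        apply String.toList_inj.mp
        simp [List.replicate_succ]
    · have hlenI : ¬ PySem.Str.len codigo < 10 := by
        simp only [PySem.Str.len_eq]
        have : ¬ codigo.toList.length < 10 := by simpa using hlt
        omega
      have h0 : 10 - codigo.length = 0 := by omega
      simp only [pvALoop, if_neg hlenI, h0, List.replicate]
      rw [hc]
      simp

theorem pvMain (id_heroe : Int) (genero_heroe : String)
    (hg : genero_heroe = "M" ∨ genero_heroe = "F" ∨ genero_heroe = "NB") :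
    generar_codigo_heroe id_heroe genero_heroe = generar_codigo_heroe_alt id_heroe genero_heroe := by
  set b := PySem.Int.toStr id_heroe with hb
  have hloop := pvALoop_spec 11 genero_heroe b "" (genero_heroe ++ "-" ++ b)
      (by simp) (by omega)
  have hdash : ("-" : String).length = 1 := by decide
  have hzeros : (max 0 (10 - PySem.Str.len (genero_heroe ++ "-") - PySem.Str.len b)).toNat
      = 10 - (genero_heroe ++ "-" ++ b).length := by
    simp only [PySem.Str.len_eq]
    simp [hdash]
    omega
  rcases hg with h | h | h
  · subst h
    simp only [generar_codigo_heroe, generar_codigo_heroe_alt]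
    rw [if_pos (by decide), if_pos (by decide), ← hb, hloop]
    apply String.toList_inj.mp
    simp
    rw [show ("M-" : String).length = 2 from by decide]
    omega
  · subst h
    simp only [generar_codigo_heroe, generar_codigo_heroe_alt]
    rw [if_pos (by decide), if_pos (by decide), ← hb, hloop]
    apply String.toList_inj.mp
    simp
    rw [show ("F-" : String).length = 2 from by decide]
    omega
  · subst h
    simp only [generar_codigo_heroe, generar_codigo_heroe_alt]
    rw [if_pos (by decide), if_pos (by decide), ← hb, hloop]
    apply String.toList_inj.mp
    simp
    rw [show ("NB-" : String).length = 3 from by decide]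
    omega

-- ===== VERDICT (by name: the statement is the Claim_ definition above) =====
theorem generar_codigo_heroe_spec : Claim_equal_generar_codigo_heroe := by
  intro id_heroe genero_heroe _
  unfold Spec_generar_codigo_heroe
  by_cases hg : genero_heroe = "M" ∨ genero_heroe = "F" ∨ genero_heroe = "NB"
  · exact pvMain id_heroe genero_heroe hg
  · rw [not_or, not_or] at hg
    obtain ⟨h1, h2, h3⟩ := hg
    simp [generar_codigo_heroe, generar_codigo_heroe_alt, h1, h2, h3]
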